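-- pv_equiv track=rewrite | github.com/barbalion/projecteuler | 212.py | genBoxes
-- ===== SOURCE A (Python) =====
-- def genBoxes(m):
--   S = [0] * (m * 6 + 1)
--
--   def fillLagFib():
--     for k in range(1, min(56, len(S))):
--       n = (100003 - 200003 * k + 300007 * k**3) % 1000000
--       S[k] = n
--     for k in range(56, len(S)):
--       n = (S[k-24] + S[k-55]) % 1000000
--       S[k] = n
--
--   def cube(n):
--     return (
--       S[6*n-5] % 10000,   # x0
--       S[6*n-4] % 10000,   # y0
--       S[6*n-3] % 10000,   # z0
--       1 + S[6*n-2] % 399, # dx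
--       1 + S[6*n-1] % 399, # dy
--       1 + S[6*n-0] % 399, # dz
--     )
--
--   def box(c):
--     x0, y0, z0, dx, dy, dz = c
--     return (x0, y0, z0, x0 + dx, y0 + dy, z0 + dz)
--
--   fillLagFib()
--   return [box(cube(n)) for n in range(1, m + 1)]
-- ===== SOURCE B (Python) =====
-- from collections import deque
--
-- def genBoxes(m):
--   boxes = []
--   w = deque(maxlen=55)      # sliding window of the last 55 sequence values
--   grp = []                  # current group of up to 6 values
--   for k in range(1, 6 * m + 1):
--     if k < 56:
--       v = (100003 - 200003 * k + 300007 * k ** 3) % 1000000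
--     else:
--       v = (w[-24] + w[0]) % 1000000
--     w.append(v)
--     grp.append(v)
--     if len(grp) == 6:
--       s1, s2, s3, s4, s5, s6 = grp
--       x0, y0, z0 = s1 % 10000, s2 % 10000, s3 % 10000
--       boxes.append((x0, y0, z0, x0 + 1 + s4 % 399, y0 + 1 + s5 % 399, z0 + 1 + s6 % 399))
--       grp = []
--   return boxes
-- ===== Notes on version B (the rewrite author's own statement) =====
-- stated objective: alternative
-- what changed: B replaces A's pre-allocated array S plus the cube()/box() helper passes with a single streaming loop that keeps only a fixed-size sliding window (deque) of recent lagged-Fibonacci values and an inline group buffer, emitting each box as soon as its group of six values completes.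
import Mathlib
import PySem

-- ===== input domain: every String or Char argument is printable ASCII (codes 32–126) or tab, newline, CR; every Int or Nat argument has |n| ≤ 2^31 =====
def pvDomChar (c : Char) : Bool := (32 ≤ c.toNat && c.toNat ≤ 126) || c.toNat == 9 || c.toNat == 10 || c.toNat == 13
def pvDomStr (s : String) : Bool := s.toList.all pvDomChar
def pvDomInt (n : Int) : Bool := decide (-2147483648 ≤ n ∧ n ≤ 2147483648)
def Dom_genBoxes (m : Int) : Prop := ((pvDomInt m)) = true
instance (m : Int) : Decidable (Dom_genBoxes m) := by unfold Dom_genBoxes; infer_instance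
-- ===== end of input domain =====

-- B fuses generation and box building into one streaming pass with a fixed-size
-- sliding window and an inline group buffer, instead of A's full array S plus the
-- cube/box helpers (alternative decomposition; return values are identical).

-- ===== PORT A =====
def genBoxes (m : Int) : List (Int × Int × Int × Int × Int × Int) :=
  let S0 : List Int := PySem.List.pyRepeat [(0 : Int)] (m * 6 + 1)
  -- fillLagFib, first loop
  let S1 := (PySem.List.pyRange 1 (min 56 (S0.length : Int)) 1).foldl
    (fun S k =>
      PySem.List.pySetD S k (PySem.Int.mod (100003 - 200003 * k + 300007 * k ^ 3) 1000000)) S0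
  -- fillLagFib, second loop (all indices read/written are in range, so pySetD/pyGetD are exact)
  let S2 := (PySem.List.pyRange 56 (S1.length : Int) 1).foldl
    (fun S k =>
      PySem.List.pySetD S k
        (PySem.Int.mod (PySem.List.pyGetD S (k - 24) 0 + PySem.List.pyGetD S (k - 55) 0) 1000000)) S1
  -- [box(cube(n)) for n in range(1, m + 1)]
  (PySem.List.pyRange 1 (m + 1) 1).map (fun n =>
    let x0 := PySem.Int.mod (PySem.List.pyGetD S2 (6 * n - 5) 0) 10000
    let y0 := PySem.Int.mod (PySem.List.pyGetD S2 (6 * n - 4) 0) 10000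
    let z0 := PySem.Int.mod (PySem.List.pyGetD S2 (6 * n - 3) 0) 10000
    let dx := 1 + PySem.Int.mod (PySem.List.pyGetD S2 (6 * n - 2) 0) 399
    let dy := 1 + PySem.Int.mod (PySem.List.pyGetD S2 (6 * n - 1) 0) 399
    let dz := 1 + PySem.Int.mod (PySem.List.pyGetD S2 (6 * n - 0) 0) 399
    (x0, y0, z0, x0 + dx, y0 + dy, z0 + dz))

-- ===== PORT B =====
-- one streaming pass; the deque(maxlen=55) is the list w (append right, drop left when full)
def genBoxes_alt (m : Int) : List (Int × Int × Int × Int × Int × Int) :=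
  ((PySem.List.pyRange 1 (6 * m + 1) 1).foldl
    (fun (st : List (Int × Int × Int × Int × Int × Int) × List Int × List Int) (k : Int) =>
      let boxes := st.1
      let w := st.2.1
      let grp := st.2.2
      let v := if k < 56 then PySem.Int.mod (100003 - 200003 * k + 300007 * k ^ 3) 1000000
               else PySem.Int.mod (PySem.List.pyGetD w (-24) 0 + PySem.List.pyGetD w 0 0) 1000000
      let w' := if w.length = 55 then w.tail ++ [v] else w ++ [v]
      let grp' := grp ++ [v]
      match grp' with
      | [s1, s2, s3, s4, s5, s6] =>
        let x0 := PySem.Int.mod s1 10000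
        let y0 := PySem.Int.mod s2 10000
        let z0 := PySem.Int.mod s3 10000
        (boxes ++ [(x0, y0, z0, x0 + 1 + PySem.Int.mod s4 399,
                    y0 + 1 + PySem.Int.mod s5 399, z0 + 1 + PySem.Int.mod s6 399)], w', ([] : List Int))
      | _ => (boxes, w', grp'))
    ([], [], [])).1

-- ===== PRECONDITION & SPEC =====
def Spec_genBoxes (m : Int) (out : List (Int × Int × Int × Int × Int × Int)) : Prop := out = genBoxes_alt m
instance (m : Int) (out : List (Int × Int × Int × Int × Int × Int)) : Decidable (Spec_genBoxes m out) := by unfold Spec_genBoxes; infer_instance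

-- ===== CLAIM (what is proved, stated in full; the proofs are below) =====
def Claim_equal_genBoxes : Prop := ∀ (m : Int), Dom_genBoxes m → Spec_genBoxes m (genBoxes m)

-- ===== LEMMAS AND PROOFS =====

-- the lagged-Fibonacci sequence both programs compute (index 0 is the untouched S[0] = 0)
def Sval : Nat → Int
  | k =>
    if h : k < 56 then
      if k = 0 then 0
      else PySem.Int.mod (100003 - 200003 * (k : Int) + 300007 * (k : Int) ^ 3) 1000000
    else
      PySem.Int.mod (Sval (k - 24) + Sval (k - 55)) 1000000
termination_by k => k
decreasing_by all_goals omega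

def boxOf (n : Nat) : Int × Int × Int × Int × Int × Int :=
  let x0 := PySem.Int.mod (Sval (6 * n - 5)) 10000
  let y0 := PySem.Int.mod (Sval (6 * n - 4)) 10000
  let z0 := PySem.Int.mod (Sval (6 * n - 3)) 10000
  (x0, y0, z0, x0 + 1 + PySem.Int.mod (Sval (6 * n - 2)) 399,
   y0 + 1 + PySem.Int.mod (Sval (6 * n - 1)) 399,
   z0 + 1 + PySem.Int.mod (Sval (6 * n)) 399)

-- (appended after claim block in final file)
theorem Sval_small (k : Nat) (h1 : 1 ≤ k) (h2 : k < 56) :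
    Sval k = PySem.Int.mod (100003 - 200003 * (k : Int) + 300007 * (k : Int) ^ 3) 1000000 := by
  unfold Sval; rw [dif_pos h2, if_neg (by omega)]

theorem Sval_big (k : Nat) (h : 56 ≤ k) :
    Sval k = PySem.Int.mod (Sval (k - 24) + Sval (k - 55)) 1000000 := by
  conv_lhs => rw [Sval]
  rw [dif_neg (by omega)]

def stepB (st : List (Int × Int × Int × Int × Int × Int) × List Int × List Int) (k : Int) :
    List (Int × Int × Int × Int × Int × Int) × List Int × List Int :=
  let boxes := st.1
  let w := st.2.1
  let grp := st.2.2
  let v := if k < 56 then PySem.Int.mod (100003 - 200003 * k + 300007 * k ^ 3) 1000000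
           else PySem.Int.mod (PySem.List.pyGetD w (-24) 0 + PySem.List.pyGetD w 0 0) 1000000
  let w' := if w.length = 55 then w.tail ++ [v] else w ++ [v]
  let grp' := grp ++ [v]
  match grp' with
  | [s1, s2, s3, s4, s5, s6] =>
    let x0 := PySem.Int.mod s1 10000
    let y0 := PySem.Int.mod s2 10000
    let z0 := PySem.Int.mod s3 10000
    (boxes ++ [(x0, y0, z0, x0 + 1 + PySem.Int.mod s4 399,
                y0 + 1 + PySem.Int.mod s5 399, z0 + 1 + PySem.Int.mod s6 399)], w', ([] : List Int))
  | _ => (boxes, w', grp')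

theorem genBoxes_alt_eq (m : Int) :
    genBoxes_alt m = ((PySem.List.pyRange 1 (6 * m + 1) 1).foldl stepB ([], [], [])).1 := rfl

def wSpec (t : Nat) : List Int := (List.range' (t + 1 - min t 55) (min t 55)).map Sval
def grpSpec (t : Nat) : List Int := (List.range' (6 * (t / 6) + 1) (t % 6)).map Sval
def boxesSpec (t : Nat) : List (Int × Int × Int × Int × Int × Int) :=
  (List.range (t / 6)).map (fun q => boxOf (q + 1))

theorem vSpec (t : Nat) :
    (if ((t : Int) + 1) < 56 then
        PySem.Int.mod (100003 - 200003 * ((t : Int) + 1) + 300007 * ((t : Int) + 1) ^ 3) 1000000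
      else PySem.Int.mod (PySem.List.pyGetD (wSpec t) (-24) 0 + PySem.List.pyGetD (wSpec t) 0 0) 1000000)
      = Sval (t + 1) := by
  by_cases h : t + 1 < 56
  · rw [if_pos (by exact_mod_cast h), Sval_small (t+1) (by omega) h]
    push_cast; ring_nf
  · rw [if_neg (by exact_mod_cast h)]
    have ht : 55 ≤ t := by omega
    have hw : wSpec t = (List.range' (t - 54) 55).map Sval := by
      unfold wSpec; rw [min_eq_right ht, show t + 1 - 55 = t - 54 by omega]
    rw [hw]
    rw [PySem.List.pyGetD_neg_ofNat _ 24 0 (by omega) (by simp)]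
    rw [PySem.List.pyGetD_zero]
    rw [Sval_big (t + 1) (by omega)]
    have e1 : t + 1 - 24 = t - 54 + 31 := by omega
    have e2 : t + 1 - 55 = t - 54 := by omega
    rw [e1, e2]
    simp

theorem wSpec_succ (t : Nat) (v : Int) (hv : v = Sval (t + 1)) :
    (if (wSpec t).length = 55 then (wSpec t).tail ++ [v] else wSpec t ++ [v]) = wSpec (t + 1) := by
  by_cases ht : 55 ≤ t
  · have hw : wSpec t = (List.range' (t - 54) 55).map Sval := by
      unfold wSpec; rw [min_eq_right ht, show t + 1 - 55 = t - 54 by omega]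
    rw [if_pos (by rw [hw]; simp)]
    rw [hw, hv]
    rw [show (55 : Nat) = 54 + 1 from rfl, List.range'_succ]
    have h2 : wSpec (t + 1) = (List.range' (t - 54 + 1) 54).map Sval ++ [Sval (t - 54 + 1 + 54)] := by
      unfold wSpec
      rw [min_eq_right (by omega), show t + 1 + 1 - 55 = t - 54 + 1 by omega,
        show (55 : Nat) = 54 + 1 from rfl, List.range'_concat]
      simp
    rw [h2, show t - 54 + 1 + 54 = t + 1 by omega]
    simp only [List.map_cons, List.tail_cons]
  · have hlen : (wSpec t).length = t := by unfold wSpec; simp; omega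
    rw [if_neg (by rw [hlen]; omega)]
    have h1 : wSpec t = (List.range' 1 t).map Sval := by
      unfold wSpec; rw [min_eq_left (by omega), show t + 1 - t = 1 by omega]
    have h2 : wSpec (t + 1) = (List.range' 1 (t + 1)).map Sval := by
      unfold wSpec; rw [min_eq_left (by omega), show t + 1 + 1 - (t + 1) = 1 by omega]
    rw [h1, h2, List.range'_concat, hv]
    simp only [List.map_append, List.map_cons, List.map_nil]
    congr 3
    omega

theorem grpSpec_lit (t : Nat) : grpSpec t = (List.range' (6 * (t / 6) + 1) (t % 6)).map Sval := rfl

theorem boxesSpec_stay (t : Nat) (h : t % 6 < 5) : boxesSpec (t + 1) = boxesSpec t := by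
  unfold boxesSpec; rw [show (t + 1) / 6 = t / 6 by omega]

theorem grpSpec_grow (t : Nat) (h : t % 6 < 5) :
    grpSpec (t + 1) = grpSpec t ++ [Sval (t + 1)] := by
  unfold grpSpec
  rw [show (t + 1) % 6 = t % 6 + 1 by omega, show (t + 1) / 6 = t / 6 by omega,
    List.range'_concat, show 6 * (t / 6) + 1 + 1 * (t % 6) = t + 1 by omega]
  simp

theorem stepB_spec (t : Nat) :
    stepB (boxesSpec t, wSpec t, grpSpec t) ((t : Int) + 1)
      = (boxesSpec (t + 1), wSpec (t + 1), grpSpec (t + 1)) := by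
  unfold stepB
  dsimp only
  rw [vSpec t, wSpec_succ t _ rfl]
  have h6 : t % 6 = 0 ∨ t % 6 = 1 ∨ t % 6 = 2 ∨ t % 6 = 3 ∨ t % 6 = 4 ∨ t % 6 = 5 := by omega
  rcases h6 with h|h|h|h|h|h
  · rw [grpSpec_lit, h, show List.range' (6 * (t / 6) + 1) 0 = [] from rfl,
      boxesSpec_stay t (by omega), grpSpec_grow t (by omega), grpSpec_lit, h,
      show List.range' (6 * (t / 6) + 1) 0 = [] from rfl]
    simp
  · rw [grpSpec_lit, h, show List.range' (6 * (t / 6) + 1) 1 = [6 * (t / 6) + 1] from rfl,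
      boxesSpec_stay t (by omega), grpSpec_grow t (by omega), grpSpec_lit, h,
      show List.range' (6 * (t / 6) + 1) 1 = [6 * (t / 6) + 1] from rfl]
    simp
  · rw [grpSpec_lit, h,
      show List.range' (6 * (t / 6) + 1) 2 = [6 * (t / 6) + 1, 6 * (t / 6) + 1 + 1] from rfl,
      boxesSpec_stay t (by omega), grpSpec_grow t (by omega), grpSpec_lit, h,
      show List.range' (6 * (t / 6) + 1) 2 = [6 * (t / 6) + 1, 6 * (t / 6) + 1 + 1] from rfl]
    simp
  · rw [grpSpec_lit, h,
      show List.range' (6 * (t / 6) + 1) 3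
        = [6 * (t / 6) + 1, 6 * (t / 6) + 1 + 1, 6 * (t / 6) + 1 + 2] from rfl,
      boxesSpec_stay t (by omega), grpSpec_grow t (by omega), grpSpec_lit, h,
      show List.range' (6 * (t / 6) + 1) 3
        = [6 * (t / 6) + 1, 6 * (t / 6) + 1 + 1, 6 * (t / 6) + 1 + 2] from rfl]
    simp
  · rw [grpSpec_lit, h,
      show List.range' (6 * (t / 6) + 1) 4
        = [6 * (t / 6) + 1, 6 * (t / 6) + 1 + 1, 6 * (t / 6) + 1 + 2, 6 * (t / 6) + 1 + 3] from rfl,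
      boxesSpec_stay t (by omega), grpSpec_grow t (by omega), grpSpec_lit, h,
      show List.range' (6 * (t / 6) + 1) 4
        = [6 * (t / 6) + 1, 6 * (t / 6) + 1 + 1, 6 * (t / 6) + 1 + 2, 6 * (t / 6) + 1 + 3] from rfl]
    simp
  · -- a group of six completes: t = 6q + 5
    rw [grpSpec_lit, h,
      show List.range' (6 * (t / 6) + 1) 5
        = [6 * (t / 6) + 1, 6 * (t / 6) + 1 + 1, 6 * (t / 6) + 1 + 2, 6 * (t / 6) + 1 + 3,
           6 * (t / 6) + 1 + 4] from rfl]
    simp only [List.map_cons, List.map_nil, List.cons_append, List.nil_append]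
    have hbox : boxesSpec (t + 1) = boxesSpec t ++ [boxOf (t / 6 + 1)] := by
      unfold boxesSpec
      rw [show (t + 1) / 6 = t / 6 + 1 by omega, List.range_succ]
      simp
    have hgrp : grpSpec (t + 1) = [] := by
      unfold grpSpec; rw [show (t + 1) % 6 = 0 by omega]; rfl
    rw [hbox, hgrp]
    unfold boxOf
    dsimp only
    rw [show 6 * (t / 6 + 1) - 5 = 6 * (t / 6) + 1 by omega,
      show 6 * (t / 6 + 1) - 4 = 6 * (t / 6) + 1 + 1 by omega,
      show 6 * (t / 6 + 1) - 3 = 6 * (t / 6) + 1 + 2 by omega,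
      show 6 * (t / 6 + 1) - 2 = 6 * (t / 6) + 1 + 3 by omega,
      show 6 * (t / 6 + 1) - 1 = 6 * (t / 6) + 1 + 4 by omega,
      show 6 * (t / 6 + 1) = t + 1 by omega]

theorem b_inv (t : Nat) :
    (PySem.List.pyRange 1 ((t : Int) + 1) 1).foldl stepB ([], [], [])
      = (boxesSpec t, wSpec t, grpSpec t) := by
  induction t with
  | zero => rw [PySem.List.pyRange_one_eq_nil (by norm_num)]; rfl
  | succ n ih =>
    rw [show ((n + 1 : Nat) : Int) + 1 = ((n : Int) + 1) + 1 by push_cast; ring,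
      PySem.List.pyRange_one_succ_right (by omega), List.foldl_append, ih]
    simp only [List.foldl_cons, List.foldl_nil]
    exact stepB_spec n

theorem b_eq (m : Int) :
    genBoxes_alt m = (List.range m.toNat).map (fun t => boxOf (t + 1)) := by
  rw [genBoxes_alt_eq]
  by_cases hm : 0 ≤ m
  · rw [show 6 * m + 1 = ((6 * m.toNat : Nat) : Int) + 1 by push_cast; omega, b_inv]
    unfold boxesSpec
    rw [show 6 * m.toNat / 6 = m.toNat by omega]
  · rw [PySem.List.pyRange_one_eq_nil (by omega), show m.toNat = 0 by omega]
    rfl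

-- ===== A-side proof =====
def fillShape (N t : Nat) : List Int :=
  (0 : Int) :: ((List.range' 1 t).map Sval ++ List.replicate (N - 1 - t) (0 : Int))

def step1 (S : List Int) (k : Int) : List Int :=
  PySem.List.pySetD S k (PySem.Int.mod (100003 - 200003 * k + 300007 * k ^ 3) 1000000)

def step2 (S : List Int) (k : Int) : List Int :=
  PySem.List.pySetD S k
    (PySem.Int.mod (PySem.List.pyGetD S (k - 24) 0 + PySem.List.pyGetD S (k - 55) 0) 1000000)

def cubeBox (S : List Int) (n : Int) : Int × Int × Int × Int × Int × Int :=
  let x0 := PySem.Int.mod (PySem.List.pyGetD S (6 * n - 5) 0) 10000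
  let y0 := PySem.Int.mod (PySem.List.pyGetD S (6 * n - 4) 0) 10000
  let z0 := PySem.Int.mod (PySem.List.pyGetD S (6 * n - 3) 0) 10000
  let dx := 1 + PySem.Int.mod (PySem.List.pyGetD S (6 * n - 2) 0) 399
  let dy := 1 + PySem.Int.mod (PySem.List.pyGetD S (6 * n - 1) 0) 399
  let dz := 1 + PySem.Int.mod (PySem.List.pyGetD S (6 * n - 0) 0) 399
  (x0, y0, z0, x0 + dx, y0 + dy, z0 + dz)

def afterFill (m : Int) : List Int :=
  (PySem.List.pyRange 56
      ((((PySem.List.pyRange 1 (min 56 ((PySem.List.pyRepeat [(0 : Int)] (m * 6 + 1)).length : Int)) 1).foldl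
          step1 (PySem.List.pyRepeat [(0 : Int)] (m * 6 + 1))).length : Int)) 1).foldl step2
    ((PySem.List.pyRange 1 (min 56 ((PySem.List.pyRepeat [(0 : Int)] (m * 6 + 1)).length : Int)) 1).foldl
      step1 (PySem.List.pyRepeat [(0 : Int)] (m * 6 + 1)))

theorem genBoxes_eq (m : Int) :
    genBoxes m = (PySem.List.pyRange 1 (m + 1) 1).map (cubeBox (afterFill m)) := rfl

theorem fillShape_length (N t : Nat) (hN : 1 ≤ N) (h : t ≤ N - 1) :
    (fillShape N t).length = N := by
  unfold fillShape; simp; omega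

theorem fillShape_getD (N t i : Nat) (h1 : 1 ≤ i) (h2 : i ≤ t) :
    PySem.List.pyGetD (fillShape N t) (i : Int) 0 = Sval i := by
  rw [PySem.List.pyGetD_natCast]
  unfold fillShape
  rcases Nat.exists_eq_add_of_le h1 with ⟨j, rfl⟩
  rw [Nat.add_comm 1 j, List.getD_cons_succ]
  rw [List.getD_eq_getElem _ _ (by simp; omega)]
  rw [List.getElem_append_left (by simp; omega)]
  rw [List.getElem_map, List.getElem_range']
  congr 1; omega

theorem fillShape_set (N t : Nat) (hN : 1 ≤ N) (h1 : t + 1 ≤ N - 1) :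
    PySem.List.pySetD (fillShape N t) ((t : Nat) + 1 : Int) (Sval (t + 1)) = fillShape N (t + 1) := by
  rw [PySem.List.pySetD_of_nonneg _ _ (show (0 : Int) ≤ (t : Int) + 1 by omega)]
  rw [show (((t : Int)) + 1).toNat = t + 1 by omega]
  unfold fillShape
  rw [List.set_cons_succ]
  rw [List.set_append_right _ _ (by simp)]
  rw [show N - 1 - t = (N - 1 - (t + 1)) + 1 by omega, List.replicate_succ]
  simp [List.range'_concat]
  rw [Nat.add_comm 1 t]

theorem loop1_inv (N : Nat) (hN : 1 ≤ N) :
    ∀ t : Nat, t ≤ 55 → t ≤ N - 1 →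
      (PySem.List.pyRange 1 ((t : Int) + 1) 1).foldl step1 (fillShape N 0) = fillShape N t := by
  intro t
  induction t with
  | zero => intro _ _; rw [PySem.List.pyRange_one_eq_nil (by norm_num)]; rfl
  | succ n ih =>
    intro h55 hn
    rw [show ((n + 1 : Nat) : Int) + 1 = ((n : Int) + 1) + 1 by push_cast; ring,
      PySem.List.pyRange_one_succ_right (by omega), List.foldl_append,
      ih (by omega) (by omega)]
    simp only [List.foldl_cons, List.foldl_nil]
    unfold step1
    rw [show ((n : Int) + 1) = ((n + 1 : Nat) : Int) by push_cast; ring]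
    rw [show PySem.Int.mod (100003 - 200003 * ((n + 1 : Nat) : Int) + 300007 * ((n + 1 : Nat) : Int) ^ 3) 1000000
          = Sval (n + 1) by rw [Sval_small (n + 1) (by omega) (by omega)]]
    exact fillShape_set N n hN (by omega)

theorem loop2_inv (N : Nat) (hN : 56 ≤ N) :
    ∀ t : Nat, 56 + t ≤ N →
      (PySem.List.pyRange 56 (56 + (t : Int)) 1).foldl step2 (fillShape N 55) = fillShape N (55 + t) := by
  intro t
  induction t with
  | zero => intro _; rw [PySem.List.pyRange_one_eq_nil (by norm_num)]; rfl
  | succ n ih =>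
    intro hn
    rw [show (56 : Int) + ((n + 1 : Nat) : Int) = (56 + (n : Int)) + 1 by push_cast; ring,
      PySem.List.pyRange_one_succ_right (by omega), List.foldl_append,
      ih (by omega)]
    simp only [List.foldl_cons, List.foldl_nil]
    unfold step2
    rw [show (56 : Int) + (n : Int) - 24 = ((32 + n : Nat) : Int) by push_cast; ring,
      show (56 : Int) + (n : Int) - 55 = ((1 + n : Nat) : Int) by push_cast; ring,
      fillShape_getD N (55 + n) (32 + n) (by omega) (by omega),
      fillShape_getD N (55 + n) (1 + n) (by omega) (by omega)]
    rw [show PySem.Int.mod (Sval (32 + n) + Sval (1 + n)) 1000000 = Sval (56 + n) by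
      rw [Sval_big (56 + n) (by omega), show 56 + n - 24 = 32 + n by omega,
        show 56 + n - 55 = 1 + n by omega]]
    rw [show (56 : Int) + (n : Int) = ((55 + n : Nat) : Int) + 1 by push_cast; ring,
      show Sval (56 + n) = Sval (55 + n + 1) by rw [show 56 + n = 55 + n + 1 by omega]]
    rw [fillShape_set N (55 + n) (by omega) (by omega)]
    rw [show 55 + (n + 1) = 55 + n + 1 by omega]

theorem cubeBox_spec (M k : Nat) (hk : k < M) :
    cubeBox ((0 : Int) :: (List.range' 1 (6 * M)).map Sval) (1 + (k : Int)) = boxOf (k + 1) := by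
  have hS : (0 : Int) :: (List.range' 1 (6 * M)).map Sval = fillShape (6 * M + 1) (6 * M) := by
    unfold fillShape; simp
  unfold cubeBox
  rw [hS]
  rw [show 6 * (1 + (k : Int)) - 5 = ((6 * k + 1 : Nat) : Int) by push_cast; ring,
    show 6 * (1 + (k : Int)) - 4 = ((6 * k + 2 : Nat) : Int) by push_cast; ring,
    show 6 * (1 + (k : Int)) - 3 = ((6 * k + 3 : Nat) : Int) by push_cast; ring,
    show 6 * (1 + (k : Int)) - 2 = ((6 * k + 4 : Nat) : Int) by push_cast; ring,
    show 6 * (1 + (k : Int)) - 1 = ((6 * k + 5 : Nat) : Int) by push_cast; ring,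
    show 6 * (1 + (k : Int)) - 0 = ((6 * k + 6 : Nat) : Int) by push_cast; ring]
  rw [fillShape_getD _ _ _ (by omega) (by omega), fillShape_getD _ _ _ (by omega) (by omega),
    fillShape_getD _ _ _ (by omega) (by omega), fillShape_getD _ _ _ (by omega) (by omega),
    fillShape_getD _ _ _ (by omega) (by omega), fillShape_getD _ _ _ (by omega) (by omega)]
  unfold boxOf
  rw [show 6 * (k + 1) - 5 = 6 * k + 1 by omega, show 6 * (k + 1) - 4 = 6 * k + 2 by omega,
    show 6 * (k + 1) - 3 = 6 * k + 3 by omega, show 6 * (k + 1) - 2 = 6 * k + 4 by omega,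
    show 6 * (k + 1) - 1 = 6 * k + 5 by omega, show 6 * (k + 1) = 6 * k + 6 by omega]
  dsimp only
  ring_nf

theorem afterFill_eq (M : Nat) : afterFill ((M : Nat) : Int) = fillShape (6 * M + 1) (6 * M) := by
  unfold afterFill
  have hS0 : PySem.List.pyRepeat [(0 : Int)] (((M : Nat) : Int) * 6 + 1) = fillShape (6 * M + 1) 0 := by
    rw [PySem.List.pyRepeat_singleton, show (((M : Nat) : Int) * 6 + 1).toNat = 6 * M + 1 by omega]
    unfold fillShape
    rw [show 6 * M + 1 - 1 - 0 = 6 * M by omega, show 6 * M + 1 = (6 * M) + 1 by omega]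
    simp [List.replicate_succ]
  rw [hS0, fillShape_length (6 * M + 1) 0 (by omega) (by omega)]
  by_cases h10 : 10 ≤ M
  · -- 6M+1 ≥ 61: first loop runs k = 1..55, second k = 56..6M
    rw [show min 56 (((6 * M + 1 : Nat) : Nat) : Int) = ((55 : Nat) : Int) + 1 by push_cast; omega]
    rw [loop1_inv (6 * M + 1) (by omega) 55 (by omega) (by omega)]
    rw [fillShape_length (6 * M + 1) 55 (by omega) (by omega)]
    rw [show (((6 * M + 1 : Nat) : Nat) : Int) = 56 + ((6 * M + 1 - 56 : Nat) : Int) by push_cast; omega]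
    rw [loop2_inv (6 * M + 1) (by omega) (6 * M + 1 - 56) (by omega)]
    rw [show 55 + (6 * M + 1 - 56) = 6 * M by omega]
  · -- 6M+1 ≤ 55: only the first loop runs, up to k = 6M; the second loop is empty
    rw [show min 56 (((6 * M + 1 : Nat) : Nat) : Int) = ((6 * M : Nat) : Int) + 1 by push_cast; omega]
    rw [loop1_inv (6 * M + 1) (by omega) (6 * M) (by omega) (by omega)]
    rw [fillShape_length (6 * M + 1) (6 * M) (by omega) (by omega)]
    rw [PySem.List.pyRange_one_eq_nil (by push_cast; omega)]
    simp only [List.foldl_nil]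

theorem a_eq (m : Int) : genBoxes m = (List.range m.toNat).map (fun t => boxOf (t + 1)) := by
  rw [genBoxes_eq]
  by_cases hm : 0 ≤ m
  · obtain ⟨M, rfl⟩ : ∃ M : Nat, m = (M : Int) := ⟨m.toNat, by omega⟩
    rw [afterFill_eq M]
    have hfill : fillShape (6 * M + 1) (6 * M) = (0 : Int) :: (List.range' 1 (6 * M)).map Sval := by
      unfold fillShape
      rw [show 6 * M + 1 - 1 - 6 * M = 0 by omega]
      simp
    rw [hfill, PySem.List.pyRange_one, show ((M : Int) + 1 - 1).toNat = M by omega,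
      show ((M : Int)).toNat = M by omega]
    rw [List.map_map]
    apply List.map_congr_left
    intro k hk
    exact cubeBox_spec M k (List.mem_range.mp hk)
  · -- m < 0: everything is empty
    rw [PySem.List.pyRange_one_eq_nil (by omega), show m.toNat = 0 by omega]
    simp

-- ===== VERDICT (by name: the statement is the Claim_ definition above) =====
theorem genBoxes_spec : Claim_equal_genBoxes := by
  intro m _
  unfold Spec_genBoxes
  rw [a_eq, b_eq]
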